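-- pv_equiv track=rewrite | github.com/dharllc/speech-to-code | backend/utils/context_map.py | extract_readme_description
-- ===== SOURCE A (Python) =====
-- def extract_readme_description(content:str)->str:
--     lines=[line.strip() for line in content.split('\n') if line.strip()]
--     if not lines:return ""
--     description=[]
--     for line in lines:
--         if line.startswith('#'):continue
--         description.append(line)
--         if len(' '.join(description))>500:break
--     return ' '.join(description)[:500]
-- ===== SOURCE B (Python) =====
-- def extract_readme_description(content: str) -> str:
--     out = ''
--     line = ''
--     for ch in content + '\n':
--         if ch != '\n':
--             line += ch
--             continue
--         s = line.strip()
--         line = ''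
--         if s and not s.startswith('#'):
--             out = s if not out else out + ' ' + s
--             if len(out) >= 500:
--                 return out[:500]
--     return out[:500]
-- ===== Notes on version B (the rewrite author's own statement) =====
-- stated objective: alternative
-- what changed: B replaces A's split-into-lines / strip / filter pipeline with its repeated join-length re-check by a single character-level streaming pass that flushes each completed line into a capped output buffer and stops once 500 characters are accumulated.
import Mathlib
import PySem

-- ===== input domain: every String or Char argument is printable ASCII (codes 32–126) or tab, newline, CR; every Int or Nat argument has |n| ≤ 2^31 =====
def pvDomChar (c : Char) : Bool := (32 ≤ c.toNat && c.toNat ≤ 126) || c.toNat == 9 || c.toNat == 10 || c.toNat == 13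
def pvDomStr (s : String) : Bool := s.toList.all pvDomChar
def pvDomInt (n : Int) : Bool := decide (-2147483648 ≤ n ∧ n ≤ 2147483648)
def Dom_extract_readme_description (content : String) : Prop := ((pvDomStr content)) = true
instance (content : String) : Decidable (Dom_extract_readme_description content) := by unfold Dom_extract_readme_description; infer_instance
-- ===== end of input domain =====

-- B replaces A's split/strip/filter line-list pipeline with its repeated ' '.join length
-- re-check by one character-level streaming pass that builds the capped output directly (objective: alternative).

-- ===== PORT A =====
-- first line of A: [line.strip() for line in content.split('\n') if line.strip()]
def pvLines (content : String) : List (List Char) :=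
  ((PySem.Chars.splitOn content.toList ['\n']).map PySem.Chars.strip).filter (fun l => !l.isEmpty)

-- the 'for line in lines' loop of A, with its 'continue' and its early 'break'
def pvALoop : List (List Char) → List (List Char) → List (List Char)
  | [], desc => desc
  | l :: rest, desc =>
    if PySem.Chars.startswith l ['#'] then pvALoop rest desc
    else
      let desc' := desc ++ [l]
      if 500 < (PySem.Chars.join [' '] desc').length then desc'
      else pvALoop rest desc'

def extract_readme_description (content : String) : String :=
  let lines := pvLines content
  if lines.isEmpty then ""
  else String.ofList (PySem.List.slice (PySem.Chars.join [' '] (pvALoop lines [])) none (some 500))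

-- ===== PORT B =====
-- B's 'for ch in content + '\n'' loop: state = (out, line); early 'return out[:500]' at the cap
def pvBLoop : List Char → List Char → List Char → List Char
  | [], out, _line => out.take 500
  | c :: rest, out, line =>
    if c ≠ '\n' then pvBLoop rest out (line ++ [c])
    else
      let s := PySem.Chars.strip line
      if !s.isEmpty && !PySem.Chars.startswith s ['#'] then
        let out' := if out.isEmpty then s else out ++ ' ' :: s
        if 500 ≤ out'.length then out'.take 500
        else pvBLoop rest out' []
      else pvBLoop rest out []

def extract_readme_description_alt (content : String) : String :=
  String.ofList (pvBLoop (content.toList ++ ['\n']) [] [])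

-- ===== PRECONDITION & SPEC =====
def Spec_extract_readme_description (content : String) (out : String) : Prop := out = extract_readme_description_alt content
instance (content : String) (out : String) : Decidable (Spec_extract_readme_description content out) := by unfold Spec_extract_readme_description; infer_instance

-- ===== CLAIM (what is proved, stated in full; the proofs are below) =====
def Claim_equal_extract_readme_description : Prop := ∀ (content : String), Dom_extract_readme_description content → Spec_extract_readme_description content (extract_readme_description content)

-- ===== LEMMAS AND PROOFS =====

-- structural reference form of content.split('\n'), accumulating the current piece on the left
def pvSplitNl : List Char → List Char → List (List Char)
  | pre, [] => [pre]
  | pre, c :: rest => if c = '\n' then pre :: pvSplitNl [] rest else pvSplitNl (pre ++ [c]) rest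

-- the lines both programs keep, and B's left fold that joins them with ' '
def pvKept (ls : List (List Char)) : List (List Char) :=
  (ls.map PySem.Chars.strip).filter (fun s => !s.isEmpty && !PySem.Chars.startswith s ['#'])

def pvJoinAcc (out : List Char) (ls : List (List Char)) : List Char :=
  ls.foldl (fun o s => if o.isEmpty then s else o ++ ' ' :: s) out

theorem pvGo_spec : ∀ (l : List Char) (fuel : Nat) (cur : List Char) (acc : List (List Char)),
    l.length ≤ fuel →
    PySem.Chars.splitOn.go ['\n'] fuel l cur acc = acc.reverse ++ pvSplitNl cur.reverse l := by
  intro l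
  induction l with
  | nil =>
    intro fuel cur acc _
    cases fuel <;> simp [PySem.Chars.splitOn.go, pvSplitNl]
  | cons c rest ih =>
    intro fuel cur acc hle
    cases fuel with
    | zero => simp at hle
    | succ f =>
      by_cases hc : c = '\n'
      · subst hc
        have hpre : (['\n'] : List Char).isPrefixOf ('\n' :: rest) = true := by
          simp [List.isPrefixOf]
        simp only [PySem.Chars.splitOn.go, hpre, if_pos]
        rw [show List.drop (['\n'] : List Char).length ('\n' :: rest) = rest from rfl]
        rw [ih f [] (cur.reverse :: acc) (by simpa using hle)]
        simp [pvSplitNl]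
      · have hpre : (['\n'] : List Char).isPrefixOf (c :: rest) = false := by
          simp only [List.isPrefixOf, List.isPrefixOf_nil_left, Bool.and_true,
            beq_eq_false_iff_ne, ne_eq]
          exact fun e => hc e.symm
        simp only [PySem.Chars.splitOn.go, hpre, Bool.false_eq_true, if_false]
        rw [ih f (c :: cur) acc (by simpa using hle)]
        simp only [pvSplitNl, if_neg hc]
        simp

theorem pvSplitOn_eq (cs : List Char) :
    PySem.Chars.splitOn cs ['\n'] = pvSplitNl [] cs := by
  unfold PySem.Chars.splitOn
  rw [pvGo_spec cs (cs.length + 1) [] [] (by omega)]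
  simp

-- a nonempty accumulator is a prefix of the whole fold
theorem pvJoinAcc_flat : ∀ (ls : List (List Char)) (out : List Char), out ≠ [] →
    pvJoinAcc out ls = out ++ ls.flatMap (fun s => ' ' :: s) := by
  intro ls
  induction ls with
  | nil => intro out _; simp [pvJoinAcc]
  | cons l r ih =>
    intro out h
    have : pvJoinAcc out (l :: r) = pvJoinAcc (out ++ ' ' :: l) r := by
      simp [pvJoinAcc, List.isEmpty_iff, h]
    rw [this, ih _ (by simp)]
    simp

theorem pvJoin_flat : ∀ (l : List Char) (r : List (List Char)),
    PySem.Chars.join [' '] (l :: r) = l ++ r.flatMap (fun s => ' ' :: s) := by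
  intro l r
  induction r generalizing l with
  | nil => simp [PySem.Chars.join_singleton]
  | cons l2 r2 ih =>
    rw [PySem.Chars.join_cons_cons, ih l2]
    simp

theorem pvJoinAcc_nil_eq_join : ∀ (ls : List (List Char)), (∀ s ∈ ls, s ≠ []) →
    pvJoinAcc [] ls = PySem.Chars.join [' '] ls := by
  intro ls h
  cases ls with
  | nil => simp [pvJoinAcc, PySem.Chars.join, List.intercalate]
  | cons l r =>
    have hl : l ≠ [] := h l (by simp)
    have : pvJoinAcc [] (l :: r) = pvJoinAcc l r := by simp [pvJoinAcc]
    rw [this, pvJoinAcc_flat r l hl, pvJoin_flat]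

-- every kept line is nonempty
theorem pvKept_ne (ls : List (List Char)) : ∀ s ∈ pvKept ls, s ≠ [] := by
  intro s hs
  unfold pvKept at hs
  have := List.of_mem_filter hs
  simp at this
  intro e
  rw [e] at this
  simp at this

-- B's loop invariant: the streamed, capped accumulation equals the capped fold over the kept lines
theorem pvBLoop_spec : ∀ (cs out line : List Char), '\n' ∉ line →
    pvBLoop (cs ++ ['\n']) out line = (pvJoinAcc out (pvKept (pvSplitNl line cs))).take 500 := by
  intro cs
  induction cs with
  | nil =>
    intro out line _
    have hnl : ('\n' : Char) ≠ '\n' ↔ False := by simp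
    simp only [List.nil_append, pvBLoop, ne_eq, hnl, iff_false, not_true_eq_false, if_false,
      pvSplitNl]
    by_cases hk : (!(PySem.Chars.strip line).isEmpty && !PySem.Chars.startswith (PySem.Chars.strip line) ['#']) = true
    · have hk' := hk
      simp only [hk, if_pos, pvKept, List.map, List.filter_cons, hk', if_pos, pvJoinAcc,
        List.foldl]
      split_ifs <;> simp [pvBLoop]
    · have hk' : (!(PySem.Chars.strip line).isEmpty && !PySem.Chars.startswith (PySem.Chars.strip line) ['#']) = false := by
        simpa using hk
      simp [hk', pvBLoop, pvKept, List.filter_cons, pvJoinAcc]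
  | cons c rest ih =>
    intro out line hline
    by_cases hc : c = '\n'
    · subst hc
      have hnl : ('\n' : Char) ≠ '\n' ↔ False := by simp
      simp only [List.cons_append, pvBLoop, ne_eq, hnl, iff_false, not_true_eq_false, if_false,
        pvSplitNl, if_pos]
      by_cases hk : (!(PySem.Chars.strip line).isEmpty && !PySem.Chars.startswith (PySem.Chars.strip line) ['#']) = true
      · simp only [hk, if_pos]
        have hkept : pvKept (line :: pvSplitNl [] rest)
            = PySem.Chars.strip line :: pvKept (pvSplitNl [] rest) := by
          simp [pvKept, List.filter_cons, hk]
        rw [hkept]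
        have hstep : pvJoinAcc out (PySem.Chars.strip line :: pvKept (pvSplitNl [] rest))
            = pvJoinAcc (if out.isEmpty then PySem.Chars.strip line else out ++ ' ' :: PySem.Chars.strip line)
                (pvKept (pvSplitNl [] rest)) := by
          by_cases ho : out.isEmpty <;> simp [pvJoinAcc, List.foldl, ho]
        rw [hstep]
        set out' := if out.isEmpty then PySem.Chars.strip line else out ++ ' ' :: PySem.Chars.strip line with hout'
        split_ifs with hcap
        · -- cap reached: out' is a nonempty prefix of the rest of the fold
          have hne : out' ≠ [] := by
            intro e; rw [e] at hcap; simp at hcap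
          rw [pvJoinAcc_flat _ out' hne, List.take_append_of_le_length (by omega)]
        · exact ih out' [] (by simp)
      · rw [if_neg (by simpa using hk)]
        have hk' : (!(PySem.Chars.strip line).isEmpty && !PySem.Chars.startswith (PySem.Chars.strip line) ['#']) = false := by
          simpa using hk
        have hkept : pvKept (line :: pvSplitNl [] rest) = pvKept (pvSplitNl [] rest) := by
          simp [pvKept, List.filter_cons, hk']
        rw [hkept]
        exact ih out [] (by simp)
    · simp only [List.cons_append, pvBLoop, ne_eq, hc, not_false_eq_true, if_pos, pvSplitNl,
        if_neg hc]
      exact ih out (line ++ [c]) (by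
        intro m
        rcases List.mem_append.mp m with h1 | h2
        · exact hline h1
        · simp at h2; exact hc h2.symm)

-- A-side: joining a nonempty prefix of the line list yields a prefix of the whole join
theorem pvJoin_prefix (extra : List (List Char)) :
    ∀ (desc : List (List Char)), desc ≠ [] →
      ∃ t, PySem.Chars.join [' '] desc ++ t = PySem.Chars.join [' '] (desc ++ extra) := by
  intro desc
  induction desc with
  | nil => intro h; exact absurd rfl h
  | cons d ds ih =>
    intro _
    cases ds with
    | nil =>
      cases extra with
      | nil => exact ⟨[], by simp⟩
      | cons e es =>
        refine ⟨[' '] ++ PySem.Chars.join [' '] (e :: es), ?_⟩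
        rw [show ([d] : List (List Char)) ++ (e :: es) = d :: e :: es from rfl,
            PySem.Chars.join_cons_cons, PySem.Chars.join_singleton]
        simp
    | cons d2 ds2 =>
      obtain ⟨t, ht⟩ := ih (by simp)
      refine ⟨t, ?_⟩
      rw [show (d :: d2 :: ds2) ++ extra = d :: ((d2 :: ds2) ++ extra) from rfl]
      rw [show ((d2 :: ds2) ++ extra : List (List Char)) = d2 :: (ds2 ++ extra) from rfl]
      rw [PySem.Chars.join_cons_cons, PySem.Chars.join_cons_cons]
      rw [show (d2 :: (ds2 ++ extra) : List (List Char)) = (d2 :: ds2) ++ extra from rfl, ← ht]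
      simp

-- the first 500 characters of A's early-terminated accumulation equal those of the full filtered join
theorem pvKey :
    ∀ (lines desc : List (List Char)),
      (PySem.Chars.join [' '] (pvALoop lines desc)).take 500
        = (PySem.Chars.join [' '] (desc ++ lines.filter (fun l => !PySem.Chars.startswith l ['#']))).take 500 := by
  intro lines
  induction lines with
  | nil => intro desc; simp [pvALoop]
  | cons l rest ih =>
    intro desc
    cases hs : PySem.Chars.startswith l ['#'] with
    | true => simp [pvALoop, hs, ih]
    | false =>
      have hfil : (l :: rest).filter (fun x => !PySem.Chars.startswith x ['#'])
          = l :: rest.filter (fun x => !PySem.Chars.startswith x ['#']) := by simp [hs]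
      by_cases hlen : 500 < (PySem.Chars.join [' '] (desc ++ [l])).length
      · have hstep : pvALoop (l :: rest) desc = desc ++ [l] := by
          simp [pvALoop, hs, hlen]
        rw [hstep, hfil,
            show desc ++ l :: rest.filter (fun x => !PySem.Chars.startswith x ['#'])
              = (desc ++ [l]) ++ rest.filter (fun x => !PySem.Chars.startswith x ['#']) by simp]
        obtain ⟨t, ht⟩ := pvJoin_prefix
          (rest.filter (fun x => !PySem.Chars.startswith x ['#'])) (desc ++ [l]) (by simp)
        rw [← ht, List.take_append_of_le_length (by omega)]
      · have hstep : pvALoop (l :: rest) desc = pvALoop rest (desc ++ [l]) := by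
          simp [pvALoop, hs, hlen]
        rw [hstep, ih (desc ++ [l]), hfil]
        congr 2
        simp

-- A's two-stage filtering equals the single kept-line filter pvKept
theorem pvLines_filter_eq (content : String) :
    (pvLines content).filter (fun l => !PySem.Chars.startswith l ['#'])
      = pvKept (PySem.Chars.splitOn content.toList ['\n']) := by
  unfold pvLines pvKept
  rw [List.filter_filter]
  exact List.filter_congr (fun x _ => Bool.and_comm _ _)

-- ===== VERDICT (by name: the statement is the Claim_ definition above) =====
theorem extract_readme_description_spec : Claim_equal_extract_readme_description := by
  intro content _
  unfold Spec_extract_readme_description extract_readme_description extract_readme_description_alt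
  dsimp only
  have hB : pvBLoop (content.toList ++ ['\n']) [] []
      = (pvJoinAcc [] (pvKept (PySem.Chars.splitOn content.toList ['\n']))).take 500 := by
    rw [pvBLoop_spec content.toList [] [] (by simp), pvSplitOn_eq]
  rw [hB, pvJoinAcc_nil_eq_join _ (pvKept_ne _)]
  by_cases h : (pvLines content).isEmpty
  · have hnil : pvLines content = [] := List.isEmpty_iff.mp h
    have hkept : pvKept (PySem.Chars.splitOn content.toList ['\n']) = [] := by
      rw [← pvLines_filter_eq, hnil]; rfl
    rw [if_pos h, hkept]
    simp [PySem.Chars.join, List.intercalate]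
  · rw [if_neg h, ← pvLines_filter_eq,
        PySem.List.slice_to (PySem.Chars.join [' '] (pvALoop (pvLines content) []))
          (show (0:Int) ≤ 500 by norm_num),
        show ((500:Int)).toNat = 500 from rfl]
    have hkey := pvKey (pvLines content) []
    simp only [List.nil_append] at hkey
    rw [hkey]
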